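-- pv_equiv track=rewrite | github.com/gboyegadada/algos | AoC15/day3.py | with_robo_santa
-- ===== SOURCE A (Python) =====
-- def with_robo_santa(instructions: str):
--   v = {(0, 0)} # ...visited
--   x, y = 0, 0 # ...Santa's last step
--   xb, yb = 0, 0 # ...bots's last step
--   santa_is_next = True
--
--   for step in instructions:
--     if santa_is_next:
--       if '^' == step:
--         y += 1
--       elif 'v' == step:
--         y -= 1
--       elif '>' == step:
--         x += 1
--       elif '<' == step:
--         x -= 1
--       v.add((x, y))
--
--     else:
--       if '^' == step:
--         yb += 1
--       elif 'v' == step: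
--         yb -= 1
--       elif '>' == step:
--         xb += 1
--       elif '<' == step:
--         xb -= 1
--       v.add((xb, yb))
--
--     santa_is_next = not santa_is_next
--
--   return v
-- ===== SOURCE B (Python) =====
-- DELTAS = {'^': (0, 1), 'v': (0, -1), '>': (1, 0), '<': (-1, 0)}
--
-- def walk(moves):
--     """Positions after each step of one mover walking alone from the origin."""
--     x, y = 0, 0
--     trail = []
--     for c in moves:
--         dx, dy = DELTAS.get(c, (0, 0))
--         x, y = x + dx, y + dy
--         trail.append((x, y))
--     return trail
--
-- def interleave(a, b):
--     """Merge the two trails back into chronological order (a moved first)."""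
--     out = []
--     for p, q in zip(a, b):
--         out += [p, q]
--     return out + a[len(b):]
--
-- def with_robo_santa(instructions: str):
--     santa_trail = walk(instructions[0::2])
--     robo_trail = walk(instructions[1::2])
--     return set([(0, 0)] + interleave(santa_trail, robo_trail))
-- ===== Notes on version B (the rewrite author's own statement) =====
-- stated objective: alternative
-- what changed: Instead of one flag-driven loop alternating two tracked positions, B slices the instructions into the two interleaved substreams ([0::2] and [1::2]), walks each mover independently over its own substream, merges the two trails chronologically, and builds the set once at the end.
import Mathlib
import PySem

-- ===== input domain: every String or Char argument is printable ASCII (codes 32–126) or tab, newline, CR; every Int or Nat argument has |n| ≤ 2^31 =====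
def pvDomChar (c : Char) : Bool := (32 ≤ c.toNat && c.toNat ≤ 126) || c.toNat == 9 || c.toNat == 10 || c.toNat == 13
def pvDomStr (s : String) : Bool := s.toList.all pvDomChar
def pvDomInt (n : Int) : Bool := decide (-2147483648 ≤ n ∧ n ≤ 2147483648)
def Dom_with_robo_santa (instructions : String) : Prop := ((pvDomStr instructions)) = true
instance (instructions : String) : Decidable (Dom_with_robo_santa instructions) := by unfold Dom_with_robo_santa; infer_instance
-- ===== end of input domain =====

-- B replaces A's single flag-driven alternating loop by two independent walks over the
-- two sliced substreams instructions[0::2] / instructions[1::2], merged chronologically.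

-- ===== PORT A =====
-- loop body of A's 'for step in instructions' (state: visited set, santa x y, robo xb yb, flag)
def stepA (st : PySem.Set (Int × Int) × Int × Int × Int × Int × Bool) (step : Char) :
    PySem.Set (Int × Int) × Int × Int × Int × Int × Bool :=
  match st with
  | (v, x, y, xb, yb, santaIsNext) =>
    if santaIsNext then
      let xy : Int × Int :=
        if step = '^' then (x, y + 1)
        else if step = 'v' then (x, y - 1)
        else if step = '>' then (x + 1, y)
        else if step = '<' then (x - 1, y)
        else (x, y)
      (PySem.Set.add v xy, xy.1, xy.2, xb, yb, !santaIsNext)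
    else
      let xy : Int × Int :=
        if step = '^' then (xb, yb + 1)
        else if step = 'v' then (xb, yb - 1)
        else if step = '>' then (xb + 1, yb)
        else if step = '<' then (xb - 1, yb)
        else (xb, yb)
      (PySem.Set.add v xy, x, y, xy.1, xy.2, !santaIsNext)

def with_robo_santa (instructions : String) : List (Int × Int) :=
  (instructions.toList.foldl stepA
    (PySem.Set.ofList [((0 : Int), (0 : Int))], 0, 0, 0, 0, true)).1

-- ===== PORT B =====
def deltasB : PySem.Dict Char (Int × Int) :=
  PySem.Dict.ofList [('^', (0, 1)), ('v', (0, -1)), ('>', (1, 0)), ('<', (-1, 0))]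

-- Source B's 'walk': positions after each step of one mover walking alone from the origin
def walkB (p : Int × Int) (moves : List Char) : List (Int × Int) :=
  match moves with
  | [] => []
  | c :: rest =>
    let d := PySem.Dict.getD deltasB c (0, 0)
    let q := (p.1 + d.1, p.2 + d.2)
    q :: walkB q rest

-- hand port of the extended slice s[0::2] (PySem.List.slice has no step): indices 0,2,4,…
def sliceStep2 {α : Type} (xs : List α) : List α :=
  match xs with
  | [] => []
  | [x] => [x]
  | x :: _ :: rest => x :: sliceStep2 rest

-- Source B's 'interleave': zip loop appending both, then the unmatched tail of a
def interleaveB (a b : List (Int × Int)) : List (Int × Int) :=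
  ((a.zip b).foldl (fun out pq => out ++ [pq.1, pq.2]) [])
    ++ PySem.List.slice a (some (b.length : Int)) none

def with_robo_santa_alt (instructions : String) : List (Int × Int) :=
  PySem.Set.ofList ([((0 : Int), (0 : Int))] ++
    interleaveB (walkB (0, 0) (sliceStep2 instructions.toList))
                (walkB (0, 0) (sliceStep2 (instructions.toList.drop 1))))

-- ===== PRECONDITION & SPEC =====
def Spec_with_robo_santa (instructions : String) (out : List (Int × Int)) : Prop := out = with_robo_santa_alt instructions
instance (instructions : String) (out : List (Int × Int)) : Decidable (Spec_with_robo_santa instructions out) := by unfold Spec_with_robo_santa; infer_instance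

-- ===== CLAIM (what is proved, stated in full; the proofs are below) =====
def Claim_equal_with_robo_santa : Prop := ∀ (instructions : String), Dom_with_robo_santa instructions → Spec_with_robo_santa instructions (with_robo_santa instructions)

-- ===== LEMMAS AND PROOFS =====

-- chronological merge, first argument moves first (interleaveB computes this on our lengths)
def imerge (a b : List (Int × Int)) : List (Int × Int) :=
  match a with
  | [] => b
  | p :: rest => p :: imerge b rest
termination_by a.length + b.length
decreasing_by simp; omega

@[simp] lemma imerge_nil (b : List (Int × Int)) : imerge [] b = b := by
  rw [imerge]

@[simp] lemma imerge_cons (p : Int × Int) (rest b : List (Int × Int)) :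
    imerge (p :: rest) b = p :: imerge b rest := by
  rw [imerge]

@[simp] lemma sliceStep2_cons {α : Type} (x : α) (xs : List α) :
    sliceStep2 (x :: xs) = x :: sliceStep2 (xs.drop 1) := by
  cases xs <;> simp [sliceStep2]

lemma interleaveB_eq_imerge : ∀ (a b : List (Int × Int)),
    b.length ≤ a.length → a.length ≤ b.length + 1 → interleaveB a b = imerge a b := by
  intro a
  induction a with
  | nil =>
    intro b h1 _
    have hb : b = [] := by simpa using h1
    subst hb
    simp [interleaveB]
  | cons p as ih =>
    intro b h1 h2
    cases b with
    | nil =>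
      simp only [interleaveB, List.zip_nil_right, List.foldl_nil, List.length_nil,
        Nat.cast_zero, List.nil_append]
      rw [show ((0 : Int)) = ((0 : Nat) : Int) by simp, PySem.List.slice_from_natCast]
      simp
    | cons q bs =>
      have h1' : bs.length ≤ as.length := by simpa using h1
      have h2' : as.length ≤ bs.length + 1 := by simp at h2; omega
      have hthis := ih bs h1' h2'
      simp only [interleaveB] at hthis ⊢
      rw [PySem.List.foldl_append_eq_flatMap] at hthis
      simp only [List.zip_cons_cons, List.foldl_cons, List.nil_append, List.length_cons]
      rw [PySem.List.foldl_append_eq_flatMap]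
      rw [PySem.List.slice_from_natCast] at hthis
      rw [PySem.List.slice_from_natCast]
      simp only [List.drop_succ_cons, imerge_cons]
      simp only [List.nil_append] at hthis
      simp [hthis]

-- B's move applied to (x, y) equals A's if/elif chain
lemma delta_spec (c : Char) (x y : Int) :
    (x + (PySem.Dict.getD deltasB c (0, 0)).1, y + (PySem.Dict.getD deltasB c (0, 0)).2)
      = (if c = '^' then (x, y + 1)
         else if c = 'v' then (x, y - 1)
         else if c = '>' then (x + 1, y)
         else if c = '<' then (x - 1, y)
         else (x, y)) := by
  have hd : deltasB = PySem.Dict.mk [('^', (0, 1)), ('v', (0, -1)), ('>', (1, 0)), ('<', (-1, 0))] := by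
    rfl
  by_cases h1 : c = '^'
  · subst h1; simp [hd, PySem.Dict.getD, PySem.Dict.get?_mk_cons]
  · by_cases h2 : c = 'v'
    · subst h2; simp [hd, PySem.Dict.getD, PySem.Dict.get?_mk_cons]; ring
    · by_cases h3 : c = '>'
      · subst h3; simp [hd, PySem.Dict.getD, PySem.Dict.get?_mk_cons]
      · by_cases h4 : c = '<'
        · subst h4; simp [hd, PySem.Dict.getD, PySem.Dict.get?_mk_cons]; ring
        · simp [hd, PySem.Dict.getD, PySem.Dict.get?,
            Ne.symm h1, Ne.symm h2, Ne.symm h3, Ne.symm h4, h1, h2, h3, h4]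

lemma ofList_append_singleton {α : Type} [BEq α] (xs : List α) (a : α) :
    PySem.Set.ofList (xs ++ [a]) = PySem.Set.add (PySem.Set.ofList xs) a := by
  simp [PySem.Set.ofList_eq_foldl, List.foldl_append]

lemma walkB_length : ∀ (cs : List Char) (p : Int × Int), (walkB p cs).length = cs.length := by
  intro cs
  induction cs with
  | nil => intro p; simp [walkB]
  | cons c rest ih => intro p; simp [walkB, ih]

lemma sliceStep2_length : ∀ (cs : List Char),
    (sliceStep2 (cs.drop 1)).length ≤ (sliceStep2 cs).length ∧
    (sliceStep2 cs).length ≤ (sliceStep2 (cs.drop 1)).length + 1 := by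
  intro cs
  induction cs with
  | nil => simp [sliceStep2]
  | cons c rest ih =>
    simp only [sliceStep2_cons, List.drop_one, List.tail_cons, List.length_cons]
    cases rest with
    | nil => simp [sliceStep2]
    | cons d rest' =>
      simp only [sliceStep2_cons, List.drop_one, List.tail_cons, List.length_cons] at ih ⊢
      omega

-- loop invariant: A's fold with either flag equals B's merged independent walks
lemma loop_eq : ∀ (cs : List Char) (x y xb yb : Int) (trail : List (Int × Int)),
    ((cs.foldl stepA (PySem.Set.ofList trail, x, y, xb, yb, true)).1
      = PySem.Set.ofList (trail ++
          imerge (walkB (x, y) (sliceStep2 cs)) (walkB (xb, yb) (sliceStep2 (cs.drop 1)))))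
  ∧ ((cs.foldl stepA (PySem.Set.ofList trail, x, y, xb, yb, false)).1
      = PySem.Set.ofList (trail ++
          imerge (walkB (xb, yb) (sliceStep2 cs)) (walkB (x, y) (sliceStep2 (cs.drop 1))))) := by
  intro cs
  induction cs with
  | nil => intro x y xb yb trail; simp [sliceStep2, walkB]
  | cons c rest ih =>
    intro x y xb yb trail
    constructor
    · -- santa moves first
      simp only [List.foldl_cons, stepA, if_true, Bool.not_true]
      rw [← ofList_append_singleton]
      rw [(ih _ _ xb yb _).2]
      simp only [sliceStep2_cons, List.drop_one, List.tail_cons, walkB, delta_spec,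
        imerge_cons, Prod.mk.eta]
      simp
    · -- robo moves first
      simp only [List.foldl_cons, stepA, Bool.false_eq_true, if_false, Bool.not_false]
      rw [← ofList_append_singleton]
      rw [(ih x y _ _ _).1]
      simp only [sliceStep2_cons, List.drop_one, List.tail_cons, walkB, delta_spec,
        imerge_cons, Prod.mk.eta]
      simp

-- ===== VERDICT (by name: the statement is the Claim_ definition above) =====
theorem with_robo_santa_spec : Claim_equal_with_robo_santa := by
  intro instructions _
  unfold Spec_with_robo_santa with_robo_santa with_robo_santa_alt
  have hlen := sliceStep2_length instructions.toList
  rw [(loop_eq instructions.toList 0 0 0 0 [((0 : Int), (0 : Int))]).1,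
    interleaveB_eq_imerge _ _
      (by rw [walkB_length, walkB_length]; exact hlen.1)
      (by rw [walkB_length, walkB_length]; exact hlen.2)]
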